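-- pv_equiv track=rewrite | github.com/royadityak94/InterviewPrep | Grokking/Bitwise/bitwise_or.py | required_flips_optimized
-- ===== SOURCE A (Python) =====
-- def required_flips_optimized(a, b, c):
--     flips = 0
--     for i in range(32):
--         bit = 1 << i
--         if bit & c:
--             if not ((bit & a) or (bit & b)):
--                 # i.e. when LSB for c is set, and not for a or b
--                 flips += 1
--         else:
--             # if a is set, flip, same for b => both (flips + 2), only one (flips + 1)
--             if bit & a:
--                 flips += 1
--             if bit & b:
--                 flips += 1
--     return flips
-- ===== SOURCE B (Python) =====
-- def required_flips_optimized(a, b, c):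
--     # Whole-word bitwise version: mask to the same 32-bit window A's loop scans,
--     # then popcount three disjoint defect masks.
--     M = 0xFFFFFFFF
--     aa, bb, cc = a & M, b & M, c & M
--     return (bin(cc & ~(aa | bb)).count("1")
--             + bin(aa & ~cc).count("1")
--             + bin(bb & ~cc).count("1"))
-- ===== Notes on version B (the rewrite author's own statement) =====
-- stated objective: alternative
-- what changed: Replaces A's 32-iteration per-bit loop with whole-word bitwise algebra: mask a,b,c to the same 32-bit window, form three disjoint defect masks (bits c needs that neither a nor b has, and bits a resp. b have that c lacks) and sum their popcounts.
import Mathlib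
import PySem

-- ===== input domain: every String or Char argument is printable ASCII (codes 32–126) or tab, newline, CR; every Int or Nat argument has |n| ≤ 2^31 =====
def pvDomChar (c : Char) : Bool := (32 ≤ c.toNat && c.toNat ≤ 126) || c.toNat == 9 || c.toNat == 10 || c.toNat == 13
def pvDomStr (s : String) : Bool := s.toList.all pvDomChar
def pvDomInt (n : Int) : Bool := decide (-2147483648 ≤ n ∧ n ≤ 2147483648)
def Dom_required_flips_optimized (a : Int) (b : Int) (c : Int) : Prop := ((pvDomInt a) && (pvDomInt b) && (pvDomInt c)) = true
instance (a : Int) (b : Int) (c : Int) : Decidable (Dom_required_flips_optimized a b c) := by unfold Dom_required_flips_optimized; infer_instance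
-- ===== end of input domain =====

-- B replaces A's 32-step per-bit loop with whole-word mask algebra and three popcounts (objective: alternative).

-- ===== PORT A =====
def required_flips_optimized (a : Int) (b : Int) (c : Int) : Int :=
  (PySem.List.pyRange 0 32 1).foldl (fun flips i =>
    let bit := (1 : Int) <<< i.toNat   -- Python's 1 << i; i ranges over 0..31 so i.toNat is exact
    if PySem.Int.band bit c ≠ 0 then
      if ¬(PySem.Int.band bit a ≠ 0 ∨ PySem.Int.band bit b ≠ 0) then flips + 1 else flips
    else
      let flips := if PySem.Int.band bit a ≠ 0 then flips + 1 else flips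
      if PySem.Int.band bit b ≠ 0 then flips + 1 else flips) 0

-- ===== PORT B =====
-- bin(x).count("1") on the nonnegative masked words is x.bit_count(): PySem.Int.bitCount is exact there
def required_flips_optimized_alt (a : Int) (b : Int) (c : Int) : Int :=
  let M : Int := 4294967295
  let aa := PySem.Int.band a M
  let bb := PySem.Int.band b M
  let cc := PySem.Int.band c M
  ((PySem.Int.bitCount (PySem.Int.band cc (Int.not (PySem.Int.bor aa bb))) +
    PySem.Int.bitCount (PySem.Int.band aa (Int.not cc)) +
    PySem.Int.bitCount (PySem.Int.band bb (Int.not cc)) : Nat) : Int)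

-- ===== PRECONDITION & SPEC =====
def Spec_required_flips_optimized (a : Int) (b : Int) (c : Int) (out : Int) : Prop := out = required_flips_optimized_alt a b c
instance (a : Int) (b : Int) (c : Int) (out : Int) : Decidable (Spec_required_flips_optimized a b c out) := by unfold Spec_required_flips_optimized; infer_instance

-- ===== CLAIM (what is proved, stated in full; the proofs are below) =====
def Claim_equal_required_flips_optimized : Prop := ∀ (a : Int) (b : Int) (c : Int), Dom_required_flips_optimized a b c → Spec_required_flips_optimized a b c (required_flips_optimized a b c)

-- ===== LEMMAS AND PROOFS =====

-- `n &&& m` is a bitwise subset of `n`, so subtracting it is the borrow-free difference `n ^^^ (n &&& m)`.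
theorem pv_sub_and (n m : Nat) : n - (n &&& m) = n ^^^ (n &&& m) := by
  induction n using Nat.strong_induction_on generalizing m with
  | _ n ih =>
    rcases Nat.eq_zero_or_pos n with h0 | hpos
    · subst h0; simp
    · have ihh := ih (n / 2) (Nat.div_lt_self hpos (by norm_num)) (m / 2)
      have hale : n / 2 &&& m / 2 ≤ n / 2 := Nat.and_le_left
      have e2 : (n &&& m) = 2 * (n / 2 &&& m / 2) + (n &&& m) % 2 := by
        conv_lhs => rw [← Nat.div_add_mod (n &&& m) 2]
        rw [Nat.and_div_two]
      have e3 : (n ^^^ (n &&& m)) = 2 * (n / 2 - (n / 2 &&& m / 2)) + (n ^^^ (n &&& m)) % 2 := by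
        conv_lhs => rw [← Nat.div_add_mod (n ^^^ (n &&& m)) 2]
        rw [Nat.xor_div_two, Nat.and_div_two, ← ihh]
      have hx : (n ^^^ (n &&& m)) % 2 = (n + (n &&& m)) % 2 := Nat.xor_mod_two_eq
      have hA1 : (n &&& m) % 2 ≤ n % 2 := by
        by_cases h : (n &&& m) % 2 = 1
        · rcases Nat.and_mod_two_eq_one.mp h with ⟨h1, _⟩; omega
        · omega
      omega

theorem pv_testBit_sub_and (n m j : Nat) :
    (n - (n &&& m)).testBit j = (n.testBit j && !(m.testBit j)) := by
  rw [pv_sub_and, Nat.testBit_xor, Nat.testBit_and]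
  cases n.testBit j <;> cases m.testBit j <;> rfl

theorem pv_shift (j : Nat) : (1 : Int) <<< j = ((2 ^ j : Nat) : Int) := by
  show Int.shiftLeft 1 j = _
  simp [Int.shiftLeft, Nat.shiftLeft_eq]

-- Python's `x & 0xFFFFFFFF` is the floor remainder mod 2^32.
theorem pv_band_mask (x : Int) :
    PySem.Int.band x 4294967295 = (((x % 4294967296).toNat : Nat) : Int) := by
  unfold PySem.Int.band
  have hM : ((4294967295 : Int)).toNat = 2 ^ 32 - 1 := by decide
  split_ifs with h1 h2 h2
  · rw [hM, Nat.and_two_pow_sub_one_eq_mod]; omega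
  · omega
  · rw [hM, Nat.and_comm, Nat.and_two_pow_sub_one_eq_mod]; omega
  · omega

-- `n & ~m` on naturals, as PySem.Int.band computes it
theorem pv_band_not (n m : Nat) :
    PySem.Int.band (n : Int) (Int.not (m : Int)) = ((n - (n &&& m) : Nat) : Int) := by
  have hnot : Int.not (m : Int) = -(m : Int) - 1 := by
    show Int.not (Int.ofNat m) = _
    simp [Int.not, Int.negSucc_eq]; ring
  unfold PySem.Int.band
  rw [hnot]
  split_ifs with h1 h2 h2
  · omega
  · have hm : (-(-(m : Int) - 1) - 1).toNat = m := by omega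
    rw [hm, Int.toNat_natCast]
  · omega
  · omega

-- the single-bit test of A's loop reads bit j of the low 32-bit window of x
theorem pv_bit_test (x : Int) (j : Nat) (hj : j < 32) :
    (PySem.Int.band ((1 : Int) <<< j) x ≠ 0) ↔ ((x % 4294967296).toNat.testBit j = true) := by
  rw [pv_shift]
  unfold PySem.Int.band
  have htn : (((2 ^ j : Nat) : Int)).toNat = 2 ^ j := Int.toNat_natCast _
  rw [if_pos (Int.natCast_nonneg (2 ^ j))]
  by_cases h2 : (0 : Int) ≤ x
  · rw [if_pos h2, htn, Nat.two_pow_and]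
    have hx : (x % 4294967296).toNat = x.toNat % 2 ^ 32 := by omega
    rw [hx, Nat.testBit_mod_two_pow]
    cases h : x.toNat.testBit j
    · simp [hj]
    · simp [hj]
  · rw [if_neg h2, htn, Nat.two_pow_and]
    set k := (-x - 1).toNat
    have hx : (x % 4294967296).toNat = 2 ^ 32 - 1 - k % 2 ^ 32 := by omega
    have hmk : k % 2 ^ 32 = (2 ^ 32 - 1) &&& k := by
      rw [Nat.and_comm, Nat.and_two_pow_sub_one_eq_mod]
    have hbit : (x % 4294967296).toNat.testBit j = !(k.testBit j) := by
      rw [hx, hmk, pv_testBit_sub_and, Nat.testBit_two_pow_sub_one]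
      simp [hj]
    rw [hbit]
    cases h : k.testBit j
    · simp
    · simp

-- popcount as a bit-indicator sum over the first k bits
theorem pv_bitCount_sum (k : Nat) : ∀ p : Nat, p < 2 ^ k →
    PySem.Int.bitCount (p : Int) =
      ((List.range k).map (fun j => if p.testBit j then 1 else 0)).sum := by
  induction k with
  | zero =>
    intro p hp
    interval_cases p
    simp [PySem.Int.bitCount_zero]
  | succ k ih =>
    intro p hp
    rcases Nat.eq_zero_or_pos p with h0 | hpos
    · subst h0
      simp [PySem.Int.bitCount_zero, Nat.zero_testBit]
    · rw [List.range_succ_eq_map, List.map_cons, List.sum_cons, List.map_map]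
      have hstep : PySem.Int.bitCount (p : Int) = p % 2 + PySem.Int.bitCount ((p / 2 : Nat) : Int) :=
        PySem.Int.bitCount_natCast hpos
      have hhalf : p / 2 < 2 ^ k := by
        have : (2 : Nat) ^ (k + 1) = 2 ^ k * 2 := by ring
        omega
      rw [hstep, ih (p / 2) hhalf]
      have hcomp : ((fun j => if p.testBit j then 1 else 0) ∘ Nat.succ) =
          (fun j => if (p / 2).testBit j then 1 else 0) := by
        funext j
        simp [Function.comp, Nat.testBit_add_one]
      rw [hcomp]
      have h0bit : (if p.testBit 0 then 1 else 0) = p % 2 := by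
        rw [Nat.testBit_zero]
        rcases (by omega : p % 2 = 0 ∨ p % 2 = 1) with h | h <;> simp [h]
      omega

-- both ports count, bit position by bit position, the same three disjoint defects
theorem pv_main (a b c : Int) : required_flips_optimized a b c = required_flips_optimized_alt a b c := by
  have hna : (a % 4294967296).toNat < 2 ^ 32 := by omega
  have hnb : (b % 4294967296).toNat < 2 ^ 32 := by omega
  have hnc : (c % 4294967296).toNat < 2 ^ 32 := by omega
  set na := (a % 4294967296).toNat with hna'
  set nb := (b % 4294967296).toNat with hnb'
  set nc := (c % 4294967296).toNat with hnc'
  -- B side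
  have hB : required_flips_optimized_alt a b c =
      ((List.range 32).map (fun j =>
        ((if (nc.testBit j && !((na ||| nb).testBit j)) then 1 else 0) +
         (if (na.testBit j && !(nc.testBit j)) then 1 else 0) +
         (if (nb.testBit j && !(nc.testBit j)) then 1 else 0) : Int))).sum := by
    show ((PySem.Int.bitCount (PySem.Int.band (PySem.Int.band c 4294967295)
            (Int.not (PySem.Int.bor (PySem.Int.band a 4294967295) (PySem.Int.band b 4294967295)))) +
          PySem.Int.bitCount (PySem.Int.band (PySem.Int.band a 4294967295) (Int.not (PySem.Int.band c 4294967295))) +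
          PySem.Int.bitCount (PySem.Int.band (PySem.Int.band b 4294967295) (Int.not (PySem.Int.band c 4294967295))) : Nat) : Int) = _
    rw [pv_band_mask a, pv_band_mask b, pv_band_mask c, ← hna', ← hnb', ← hnc',
        PySem.Int.bor_natCast, pv_band_not nc (na ||| nb), pv_band_not na nc, pv_band_not nb nc,
        pv_bitCount_sum 32 (nc - (nc &&& (na ||| nb))) (by omega),
        pv_bitCount_sum 32 (na - (na &&& nc)) (by omega),
        pv_bitCount_sum 32 (nb - (nb &&& nc)) (by omega)]
    push_cast [Nat.cast_list_sum]
    rw [List.map_map, List.map_map, List.map_map,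
        ← PySem.List.sum_map_add_int, ← PySem.List.sum_map_add_int]
    refine congrArg List.sum (List.map_congr_left ?_)
    intro j hj
    simp only [Function.comp, pv_testBit_sub_and, Nat.testBit_or]
    cases na.testBit j <;> cases nb.testBit j <;> cases nc.testBit j <;> simp
  -- A side
  have h32 : (32 : Int) = ((32 : Nat) : Int) := by norm_num
  rw [hB]
  show (PySem.List.pyRange 0 32 1).foldl _ 0 = _
  rw [PySem.List.foldl_congr_mem _ _
        (fun (flips i : Int) => flips +
          (if PySem.Int.band ((1 : Int) <<< (i.toNat : Int)) c ≠ 0 then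
            (if ¬(PySem.Int.band ((1 : Int) <<< (i.toNat : Int)) a ≠ 0 ∨ PySem.Int.band ((1 : Int) <<< (i.toNat : Int)) b ≠ 0) then 1 else 0)
           else
            (if PySem.Int.band ((1 : Int) <<< (i.toNat : Int)) a ≠ 0 then 1 else 0) +
            (if PySem.Int.band ((1 : Int) <<< (i.toNat : Int)) b ≠ 0 then 1 else 0))) 0
        (by intro s x hx; dsimp only; split_ifs <;> push_cast <;> ring),
      PySem.List.foldl_add, h32, PySem.List.pyRange_zero_natCast, List.map_map, zero_add]
  refine congrArg List.sum (List.map_congr_left ?_)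
  intro j hj
  have hj32 : j < 32 := List.mem_range.mp hj
  simp only [Function.comp, Int.toNat_natCast, Int.shiftLeft_natCast_right]
  by_cases hA : na.testBit j = true <;> by_cases hBb : nb.testBit j = true <;> by_cases hC : nc.testBit j = true <;>
    simp only [Bool.not_eq_true] at hA hBb hC <;>
    simp [pv_bit_test a j hj32, pv_bit_test b j hj32, pv_bit_test c j hj32, ← hna', ← hnb', ← hnc', hA, hBb, hC]

-- ===== VERDICT (by name: the statement is the Claim_ definition above) =====
theorem required_flips_optimized_spec : Claim_equal_required_flips_optimized := by
  intro a b c _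
  exact pv_main a b c
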